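-- pv_equiv track=rewrite | github.com/hmbui/EpicsBuildAnalysis | epics_build_analysis_launcher/main.py | _validate_module_name
-- ===== SOURCE A (Python) =====
-- def _validate_module_name(module_name):
--     """
--     Validate a module name against a standard pattern:
--
--     1. The module name must start with "/R".
--     2. The module name must contains dots as version digit separators.
--     3. The module name, after separating from the prefix "/R", and the separators '-'s and '.'s, must contain all
--        digits.
--
--     Parameters
--     ----------
--     module_name : str
--         The module name to validate
--
--     Returns : bool
--     -------
--         True if the module name is valid; False otherwise
--     """
--     module_name = module_name[module_name.find('/'):]
--     if module_name:
--         if module_name.startswith('/R') and '.' in module_name: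
--             partitions = module_name[2:].split('-')
--             for part in partitions:
--                 digits = part.split('.')
--                 for digit in digits:
--                     if not digit.isdigit():
--                         return False
--             return True
--     return False
-- ===== SOURCE B (Python) =====
-- def _validate_module_name(module_name):
--     module_name = module_name[module_name.find('/'):]
--     if not (module_name.startswith('/R') and '.' in module_name):
--         return False
--     prev_sep = True  # a version token must start here
--     for ch in module_name[2:]:
--         if ch in '-.':
--             if prev_sep:
--                 return False
--             prev_sep = True
--         elif ch.isdigit():
--             prev_sep = False
--         else:
--             return False
--     return not prev_sep
-- ===== Notes on version B (the rewrite author's own statement) =====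
-- stated objective: alternative
-- what changed: Replaces the nested dash-split / dot-split loops with a single left-to-right state-machine pass over the version suffix that tracks whether the previous character was a separator.
import Mathlib
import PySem

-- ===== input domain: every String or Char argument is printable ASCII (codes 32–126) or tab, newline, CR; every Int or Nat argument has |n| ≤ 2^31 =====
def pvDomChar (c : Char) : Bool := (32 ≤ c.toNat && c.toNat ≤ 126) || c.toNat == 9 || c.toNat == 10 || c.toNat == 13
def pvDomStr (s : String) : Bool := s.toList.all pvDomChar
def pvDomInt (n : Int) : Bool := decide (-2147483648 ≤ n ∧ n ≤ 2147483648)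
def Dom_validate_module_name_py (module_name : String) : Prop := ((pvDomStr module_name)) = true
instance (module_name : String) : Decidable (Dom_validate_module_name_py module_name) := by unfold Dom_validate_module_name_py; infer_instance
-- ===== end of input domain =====

-- B replaces A's nested split('-')/split('.') loops by a single state-machine pass over the
-- version suffix (alternative decomposition, same asymptotic cost).


-- ===== PORT A =====
-- inner loop: 'for digit in digits: if not digit.isdigit(): return False'
def pyA_inner : List (List Char) → Bool
  | [] => true
  | d :: rest => if !(PySem.Chars.strIsdigit d) then false else pyA_inner rest

-- outer loop: 'for part in partitions: digits = part.split(".") ; <inner loop>' then 'return True'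
def pyA_outer : List (List Char) → Bool
  | [] => true
  | p :: rest =>
      if pyA_inner (PySem.Chars.splitOn p ['.']) then pyA_outer rest else false

def validate_module_name_py (module_name : String) : Bool :=
  let s := PySem.Str.slice module_name (some (PySem.Str.find module_name "/")) none
  if s ≠ "" then
    if PySem.Str.startswith s "/R" && PySem.Str.isIn "." s then
      pyA_outer (PySem.Chars.splitOn (PySem.Str.slice s (some 2) none).toList ['-'])
    else false
  else false

-- ===== PORT B =====
-- 'prev_sep = True; for ch in s[2:]: …; return not prev_sep'
def pyB_scan : List Char → Bool → Bool
  | [], prevSep => !prevSep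
  | c :: rest, prevSep =>
      if c == '-' || c == '.' then
        if prevSep then false else pyB_scan rest true
      else if PySem.Chars.isdigit c then pyB_scan rest false
      else false

def validate_module_name_py_alt (module_name : String) : Bool :=
  let s := PySem.Str.slice module_name (some (PySem.Str.find module_name "/")) none
  if !(PySem.Str.startswith s "/R" && PySem.Str.isIn "." s) then false
  else pyB_scan (PySem.Str.slice s (some 2) none).toList true

-- ===== PRECONDITION & SPEC =====
def Spec_validate_module_name_py (module_name : String) (out : Bool) : Prop := out = validate_module_name_py_alt module_name
instance (module_name : String) (out : Bool) : Decidable (Spec_validate_module_name_py module_name out) := by unfold Spec_validate_module_name_py; infer_instance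

-- ===== CLAIM (what is proved, stated in full; the proofs are below) =====
def Claim_equal_validate_module_name_py : Prop := ∀ (module_name : String), Dom_validate_module_name_py module_name → Spec_validate_module_name_py module_name (validate_module_name_py module_name)

-- ===== LEMMAS AND PROOFS =====

-- generic single-pass tokenizer: split cs at the characters satisfying sep, cur = current token reversed
def tokAux (sep : Char → Bool) : List Char → List Char → List (List Char)
  | [], cur => [cur.reverse]
  | x :: rest, cur => if sep x then cur.reverse :: tokAux sep rest [] else tokAux sep rest (x :: cur)

theorem tokAux_ne_nil (sep : Char → Bool) (cs cur : List Char) : tokAux sep cs cur ≠ [] := by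
  induction cs generalizing cur with
  | nil => simp [tokAux]
  | cons x rest ih => simp only [tokAux]; split <;> simp [ih]

theorem go_spec (c : Char) (fuel : Nat) (l cur : List Char) (acc : List (List Char))
    (h : l.length < fuel) :
    PySem.Chars.splitOn.go [c] fuel l cur acc = acc.reverse ++ tokAux (· == c) l cur := by
  induction fuel generalizing l cur acc with
  | zero => omega
  | succ fuel ih =>
    cases l with
    | nil => simp [PySem.Chars.splitOn.go, tokAux]
    | cons x rest =>
      simp only [PySem.Chars.splitOn.go]
      by_cases hx : x = c
      · subst hx
        simp only [List.isPrefixOf, beq_self_eq_true, Bool.and_self, if_true]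
        rw [show List.drop [x].length (x :: rest) = rest from rfl]
        rw [ih rest [] (cur.reverse :: acc) (by simpa using Nat.lt_of_succ_lt_succ h)]
        simp [tokAux]
      · have hpre : [c].isPrefixOf (x :: rest) = false := by
          simp [List.isPrefixOf]; exact fun h' => absurd h'.symm hx
        simp only [hpre, Bool.false_eq_true, if_false]
        rw [ih rest (x :: cur) acc (by simpa using Nat.lt_of_succ_lt_succ h)]
        simp [tokAux, hx]

theorem splitOn_eq_tokAux (c : Char) (cs : List Char) :
    PySem.Chars.splitOn cs [c] = tokAux (· == c) cs [] := by
  unfold PySem.Chars.splitOn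
  rw [go_spec c (cs.length + 1) cs [] [] (by omega)]
  simp

theorem tokAux_shift (sep : Char → Bool) (cs cur : List Char) :
    tokAux sep cs cur = (tokAux sep cs []).modifyHead (cur.reverse ++ ·) := by
  induction cs generalizing cur with
  | nil => simp [tokAux]
  | cons x rest ih =>
    simp only [tokAux]
    by_cases hx : sep x = true
    · simp [hx]
    · simp only [hx, Bool.false_eq_true, if_false]
      rw [ih (x :: cur), ih [x]]
      cases h : tokAux sep rest [] with
      | nil => exact absurd h (tokAux_ne_nil sep rest [])
      | cons hd tl => simp

theorem tokAux_comp (d e : Char → Bool) (cs : List Char) :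
    (tokAux d cs []).flatMap (fun p => tokAux e p []) = tokAux (fun x => d x || e x) cs [] := by
  induction cs with
  | nil => simp [tokAux]
  | cons x rest ih =>
    by_cases hd : d x = true
    · simp [tokAux, hd, ih]
    · by_cases he : e x = true
      · simp only [tokAux, hd, Bool.false_eq_true, if_false, he, Bool.false_or, if_true]
        rw [tokAux_shift d rest [x]]
        cases h : tokAux d rest [] with
        | nil => exact absurd h (tokAux_ne_nil d rest [])
        | cons hd' tl =>
          simp only [List.modifyHead, List.reverse_singleton, List.singleton_append,
            List.flatMap_cons, tokAux, he, if_true, List.reverse_nil]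
          rw [← ih, h]
          simp
      · simp only [tokAux, hd, Bool.false_eq_true, if_false, he, Bool.false_or]
        rw [tokAux_shift d rest [x], tokAux_shift (fun x => d x || e x) rest [x]]
        cases h : tokAux d rest [] with
        | nil => exact absurd h (tokAux_ne_nil d rest [])
        | cons hd' tl =>
          simp only [List.modifyHead, List.reverse_singleton, List.singleton_append,
            List.flatMap_cons]
          rw [show tokAux e (x :: hd') [] = tokAux e hd' [x] by simp [tokAux, he]]
          rw [tokAux_shift e hd' [x]]
          cases h2 : tokAux e hd' [] with
          | nil => exact absurd h2 (tokAux_ne_nil e hd' [])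
          | cons hd2 tl2 =>
            rw [← ih, h]
            simp [List.flatMap_cons, h2]

theorem inner_all (ds : List (List Char)) : pyA_inner ds = ds.all PySem.Chars.strIsdigit := by
  induction ds with
  | nil => rfl
  | cons d rest ih => simp only [pyA_inner, List.all_cons, ih]; cases PySem.Chars.strIsdigit d <;> simp

theorem outer_all (ps : List (List Char)) :
    pyA_outer ps = ps.all (fun p => (tokAux (· == '.') p []).all PySem.Chars.strIsdigit) := by
  induction ps with
  | nil => rfl
  | cons p rest ih =>
    simp only [pyA_outer, inner_all, splitOn_eq_tokAux, List.all_cons, ih]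
    split <;> simp_all

theorem tok_bad (sep : Char → Bool) (cs cur : List Char) (x : Char) (hx : x ∈ cur)
    (hxd : PySem.Chars.isdigit x = false) :
    (tokAux sep cs cur).all PySem.Chars.strIsdigit = false := by
  induction cs generalizing cur with
  | nil =>
    simp only [tokAux, List.all_cons, List.all_nil, Bool.and_true]
    simp only [PySem.Chars.strIsdigit, Bool.and_eq_false_iff]
    right
    simp only [List.all_reverse, List.all_eq_false]
    exact ⟨x, hx, by simp [hxd]⟩
  | cons y rest ih =>
    simp only [tokAux]
    by_cases hy : sep y = true
    · simp only [hy, if_true, List.all_cons, Bool.and_eq_false_iff]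
      left
      simp only [PySem.Chars.strIsdigit, Bool.and_eq_false_iff]
      right
      simp only [List.all_reverse, List.all_eq_false]
      exact ⟨x, hx, by simp [hxd]⟩
    · simpa [hy] using ih (y :: cur) (List.mem_cons_of_mem y hx)

theorem scan_tok (cs cur : List Char) (h : cur.all PySem.Chars.isdigit = true) :
    pyB_scan cs cur.isEmpty = (tokAux (fun x => (x == '-') || (x == '.')) cs cur).all PySem.Chars.strIsdigit := by
  induction cs generalizing cur with
  | nil =>
    simp only [pyB_scan, tokAux, List.all_cons, List.all_nil, Bool.and_true]
    simp only [PySem.Chars.strIsdigit, List.all_reverse, h, Bool.and_true]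
    cases cur <;> simp
  | cons x rest ih =>
    simp only [pyB_scan, tokAux]
    by_cases hx : ((x == '-') || (x == '.')) = true
    · simp only [hx, if_true, List.all_cons]
      cases cur with
      | nil => simp [PySem.Chars.strIsdigit]
      | cons a t =>
        simp only [List.isEmpty_cons, Bool.false_eq_true, if_false]
        have hih := ih [] (by simp)
        simp only [List.isEmpty_nil] at hih
        have hdig : PySem.Chars.strIsdigit ((a :: t).reverse) = true := by
          simp only [PySem.Chars.strIsdigit, List.all_reverse, h, Bool.and_true]
          simp
        rw [hih]
        have hdig2 : PySem.Chars.strIsdigit (t.reverse ++ [a]) = true := by simpa using hdig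
        simp [hdig2]
    · simp only [hx, Bool.false_eq_true, if_false]
      by_cases hd : PySem.Chars.isdigit x = true
      · simp only [hd, if_true]
        have := ih (x :: cur) (by simp [hd, h])
        simpa using this
      · simp only [hd, Bool.false_eq_true, if_false]
        exact (tok_bad _ rest (x :: cur) x (by simp) (by simpa using hd)).symm

theorem main_scan (cs : List Char) :
    pyA_outer (PySem.Chars.splitOn cs ['-']) = pyB_scan cs true := by
  rw [splitOn_eq_tokAux, outer_all]
  rw [← List.all_flatMap, tokAux_comp]
  have := scan_tok cs [] (by simp)
  simp only [List.isEmpty_nil] at this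
  rw [this]

-- ===== VERDICT (by name: the statement is the Claim_ definition above) =====
theorem validate_module_name_py_spec : Claim_equal_validate_module_name_py := by
  intro module_name _
  unfold Spec_validate_module_name_py validate_module_name_py validate_module_name_py_alt
  set s := PySem.Str.slice module_name (some (PySem.Str.find module_name "/")) none with hs
  by_cases hempty : s = ""
  · simp [hempty]
    decide
  · simp only [hempty, ne_eq, not_false_eq_true, if_true]
    cases hsw : (PySem.Str.startswith s "/R" && PySem.Str.isIn "." s) with
    | true =>
        simp only [if_true, Bool.not_true, Bool.false_eq_true, if_false]
        exact main_scan _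
    | false =>
        simp only [Bool.not_false, if_true, Bool.false_eq_true, if_false]
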